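-- pv_equiv track=rewrite | github.com/vhsw/CodeMasters_Tourney | Python 3/nontransitiveDice.py | nontransitiveDice
-- ===== SOURCE A (Python) =====
-- from itertools import permutations
--
-- def nontransitiveDice(dice):
--     def beats(x1, x2):
--         ans = 0
--         for x in x1:
--             for y in x2:
--                 if x > y:
--                     ans += 1
--                 elif x < y:
--                     ans -= 1
--         return ans > 0
--
--     for p in permutations(range(3)):
--         if beats(dice[p[0]], dice[p[1]]) and \
--            beats(dice[p[1]], dice[p[2]]) and \
--            not beats(dice[p[0]], dice[p[2]]):
--             return True
--     return False
-- ===== SOURCE B (Python) =====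
-- def nontransitiveDice(dice):
--     def bisect_left(a, x):
--         lo, hi = 0, len(a)
--         while lo < hi:
--             mid = (lo + hi) // 2
--             if a[mid] < x:
--                 lo = mid + 1
--             else:
--                 hi = mid
--         return lo
--
--     def bisect_right(a, x):
--         lo, hi = 0, len(a)
--         while lo < hi:
--             mid = (lo + hi) // 2
--             if x < a[mid]:
--                 hi = mid
--             else:
--                 lo = mid + 1
--         return lo
--
--     def score(a, sb):
--         # wins minus losses of die a against die b, where sb = sorted(b):
--         # sum over x in a of (#faces of b below x) - (#faces of b above x)
--         m = len(sb)
--         return sum(bisect_left(sb, x) - (m - bisect_right(sb, x)) for x in a)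
--
--     d0, d1, d2 = dice[0], dice[1], dice[2]
--     s01 = score(d0, sorted(d1))
--     s12 = score(d1, sorted(d2))
--     s02 = score(d0, sorted(d2))
--     w01, w10 = s01 > 0, s01 < 0
--     w12, w21 = s12 > 0, s12 < 0
--     w02, w20 = s02 > 0, s02 < 0
--     return (w01 and w12 and not w02) or (w02 and w21 and not w01) \
--         or (w10 and w02 and not w12) or (w12 and w20 and not w10) \
--         or (w20 and w01 and not w21) or (w21 and w10 and not w20)
-- ===== Notes on version B (the rewrite author's own statement) =====
-- stated objective: faster
-- what changed: Instead of running the O(n*m) nested-loop comparison for each of the 6 permutations (18 quadratic beats calls), B sorts each second die once and computes the three pairwise win-loss scores with binary searches (wins = faces below x, losses = faces above x), derives all six directed 'beats' booleans from the signs of those three scores (score is antisymmetric), and checks the six cycle conditions directly.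
import Mathlib
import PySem

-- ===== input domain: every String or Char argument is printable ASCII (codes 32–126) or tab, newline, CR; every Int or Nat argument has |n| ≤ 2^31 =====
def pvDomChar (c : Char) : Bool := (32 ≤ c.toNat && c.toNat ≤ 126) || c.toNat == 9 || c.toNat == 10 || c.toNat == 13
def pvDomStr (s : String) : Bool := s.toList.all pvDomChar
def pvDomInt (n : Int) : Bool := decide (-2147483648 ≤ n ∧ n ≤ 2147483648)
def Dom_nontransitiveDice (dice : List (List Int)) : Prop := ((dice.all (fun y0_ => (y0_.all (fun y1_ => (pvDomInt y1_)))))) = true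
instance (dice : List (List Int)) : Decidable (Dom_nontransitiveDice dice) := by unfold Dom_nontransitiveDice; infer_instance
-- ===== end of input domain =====

-- B replaces A's 18 quadratic nested-loop 'beats' passes by three pairwise scores
-- computed via sorting + binary search and sign tests (objective: faster, asymptotic).

-- ===== PORT A =====
-- A's inner helper beats(x1, x2): nested loop accumulating +1/-1, then 'ans > 0'
def pvBeats (x1 x2 : List Int) : Bool :=
  decide (0 < x1.foldl (fun ans x =>
    x2.foldl (fun a y => if y < x then a + 1 else if x < y then a - 1 else a) ans) (0 : Int))

def nontransitiveDice (dice : List (List Int)) : Bool :=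
  (PySem.List.permutations (PySem.List.pyRange 0 3 1) 3).any (fun p =>
    pvBeats (PySem.List.pyGetD dice (PySem.List.pyGetD p 0 0) [])
            (PySem.List.pyGetD dice (PySem.List.pyGetD p 1 0) []) &&
    pvBeats (PySem.List.pyGetD dice (PySem.List.pyGetD p 1 0) [])
            (PySem.List.pyGetD dice (PySem.List.pyGetD p 2 0) []) &&
    ! pvBeats (PySem.List.pyGetD dice (PySem.List.pyGetD p 0 0) [])
              (PySem.List.pyGetD dice (PySem.List.pyGetD p 2 0) []))

-- ===== PORT B =====
-- Source B's hand-written bisect_left/bisect_right are verbatim the standard bisect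
-- algorithm, ported as the PySem primitives of the same name.
-- Source B's score(a, sb): wins minus losses of a against sorted sb, via binary search.
def pvScore (a sb : List Int) : Int :=
  (a.map (fun x =>
    (PySem.List.bisectLeft sb x : Int)
      - ((sb.length : Int) - (PySem.List.bisectRight sb x : Int)))).sum

def nontransitiveDice_alt (dice : List (List Int)) : Bool :=
  let d0 := PySem.List.pyGetD dice 0 []
  let d1 := PySem.List.pyGetD dice 1 []
  let d2 := PySem.List.pyGetD dice 2 []
  let s01 := pvScore d0 (PySem.List.sorted d1 (fun x => x))
  let s12 := pvScore d1 (PySem.List.sorted d2 (fun x => x))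
  let s02 := pvScore d0 (PySem.List.sorted d2 (fun x => x))
  let w01 := decide (0 < s01); let w10 := decide (s01 < 0)
  let w12 := decide (0 < s12); let w21 := decide (s12 < 0)
  let w02 := decide (0 < s02); let w20 := decide (s02 < 0)
  (w01 && w12 && !w02) || (w02 && w21 && !w01) || (w10 && w02 && !w12)
    || (w12 && w20 && !w10) || (w20 && w01 && !w21) || (w21 && w10 && !w20)

-- ===== PRECONDITION & SPEC =====
-- A evaluates dice[0], dice[1], dice[2]; on fewer than three dice it raises IndexError.
def Pre_nontransitiveDice (dice : List (List Int)) : Prop := 3 ≤ dice.length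
instance (dice : List (List Int)) : Decidable (Pre_nontransitiveDice dice) := by
  unfold Pre_nontransitiveDice; infer_instance
def pvWitness_nontransitiveDice : List (List Int) := [[1, 4], [2, 2], [3, 0]]

def Spec_nontransitiveDice (dice : List (List Int)) (out : Bool) : Prop := out = nontransitiveDice_alt dice
instance (dice : List (List Int)) (out : Bool) : Decidable (Spec_nontransitiveDice dice out) := by unfold Spec_nontransitiveDice; infer_instance

-- ===== CLAIM (what is proved, stated in full; the proofs are below) =====
def Claim_equal_nontransitiveDice : Prop := ∀ (dice : List (List Int)), Dom_nontransitiveDice dice → Pre_nontransitiveDice dice → Spec_nontransitiveDice dice (nontransitiveDice dice)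

-- ===== LEMMAS AND PROOFS =====

-- A's inner loop over x2 adds (#y < x) and subtracts (#y > x).
theorem pvInner_fold (x : Int) (b : List Int) (a : Int) :
    b.foldl (fun a y => if y < x then a + 1 else if x < y then a - 1 else a) a
      = a + (b.countP (fun y => decide (y < x)) : Int)
          - (b.countP (fun y => decide (x < y)) : Int) := by
  induction b generalizing a with
  | nil => simp
  | cons y t ih =>
    simp only [List.foldl_cons, List.countP_cons, ih]
    by_cases h1 : y < x
    · simp [h1, lt_asymm h1]; ring
    · by_cases h2 : x < y
      · simp [h1, h2]; ring
      · simp [h1, h2]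

-- A's beats numerator as a sum of per-face win-loss differences.
def pvT (a b : List Int) : Int :=
  (a.map (fun x =>
    (b.countP (fun y => decide (y < x)) : Int)
      - (b.countP (fun y => decide (x < y)) : Int))).sum

theorem pvBeats_eq (a b : List Int) : pvBeats a b = decide (0 < pvT a b) := by
  have h : ∀ (init : Int),
      a.foldl (fun ans x =>
        b.foldl (fun a y => if y < x then a + 1 else if x < y then a - 1 else a) ans) init
        = init + pvT a b := by
    induction a with
    | nil => simp [pvT]
    | cons x t ih =>
      intro init
      rw [List.foldl_cons, ih, pvInner_fold]
      simp only [pvT, List.map_cons, List.sum_cons]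
      ring
  rw [pvBeats, h 0, zero_add]

-- double counting: the pairs (x, y) with x from a, y from b, r y x, counted either way
theorem pvCount_swap (r : Int → Int → Bool) (a b : List Int) :
    (a.map (fun x => (b.countP (fun y => r y x) : Int))).sum
      = (b.map (fun y => (a.countP (fun x => r y x) : Int))).sum := by
  induction a with
  | nil => simp
  | cons x t ih =>
    simp only [List.map_cons, List.sum_cons, List.countP_cons, ih]
    have e : (b.map (fun y => ((t.countP (fun x => r y x) + if r y x then 1 else 0 : Nat) : Int))).sum
        = (b.map (fun y => (t.countP (fun x => r y x) : Int) + (if r y x then 1 else 0 : Int))).sum := by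
      apply congrArg
      apply List.map_congr_left
      intro y _
      split <;> push_cast <;> ring
    rw [e, PySem.List.sum_map_add_int, PySem.List.sum_map_ite_one_zero]
    omega

theorem pvT_antisym (a b : List Int) : pvT a b = -pvT b a := by
  have e1 : ∀ (u v : List Int),
      (u.map (fun x => (v.countP (fun y => decide (y < x)) : Int)
        - (v.countP (fun y => decide (x < y)) : Int))).sum
      = (u.map (fun x => (v.countP (fun y => decide (y < x)) : Int))).sum
        - (u.map (fun x => (v.countP (fun y => decide (x < y)) : Int))).sum := by
    intro u v
    induction u with
    | nil => simp
    | cons x t ih => simp only [List.map_cons, List.sum_cons, ih]; ring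
  have h1 := pvCount_swap (fun y x => decide (y < x)) a b
  have h2 := pvCount_swap (fun y x => decide (x < y)) a b
  simp only [pvT, e1]
  omega

-- countP of a list whose first r index positions satisfy p and the rest do not is r.
theorem pvCountP_split {p : Int → Bool} {s : List Int} {r : Nat} (hr : r ≤ s.length)
    (h1 : ∀ j (hj : j < s.length), j < r → p s[j])
    (h2 : ∀ j (hj : j < s.length), r ≤ j → ¬ p s[j] = true) :
    s.countP p = r := by
  have hsplit : s = s.take r ++ s.drop r := (List.take_append_drop r s).symm
  rw [hsplit, List.countP_append]
  have htake : (s.take r).countP p = r := by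
    have hlen : (s.take r).length = r := by simp [List.length_take]; omega
    have hall : (s.take r).countP p = (s.take r).length := by
      rw [List.countP_eq_length]
      intro y hy
      obtain ⟨i, hi, hyi⟩ := List.mem_iff_getElem.mp hy
      have hi' : i < s.length := by omega
      have hg : (s.take r)[i] = s[i] := List.getElem_take
      rw [← hyi, hg]
      exact h1 i hi' (by omega)
    omega
  have hdrop : (s.drop r).countP p = 0 := by
    rw [List.countP_eq_zero]
    intro y hy
    obtain ⟨i, hi, hyi⟩ := List.mem_iff_getElem.mp hy
    have hi' : r + i < s.length := by simp [List.length_drop] at hi; omega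
    have hg : (s.drop r)[i] = s[r + i] := by simp [List.getElem_drop]
    rw [← hyi, hg]
    exact h2 (r + i) hi' (by omega)
  omega

theorem pvBisectLeft_count (s : List Int) (x : Int) (hs : s.Pairwise (· ≤ ·)) :
    PySem.List.bisectLeft s x = s.countP (fun y => decide (y < x)) := by
  obtain ⟨hle, hlo, hhi⟩ := PySem.List.bisectLeft_spec s x hs
  exact (pvCountP_split hle
    (fun j hj hjr => by simpa using hlo j hj hjr)
    (fun j hj hjr => by simpa using not_lt.mpr (hhi j hj hjr))).symm

theorem pvBisectRight_count (s : List Int) (x : Int) (hs : s.Pairwise (· ≤ ·)) :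
    PySem.List.bisectRight s x = s.countP (fun y => decide (y ≤ x)) := by
  obtain ⟨hle, hlo, hhi⟩ := PySem.List.bisectRight_spec s x hs
  exact (pvCountP_split hle
    (fun j hj hjr => by simpa using hlo j hj hjr)
    (fun j hj hjr => by simpa using not_le.mpr (hhi j hj hjr))).symm

-- B's binary-search score equals A's nested-loop score.
theorem pvScore_eq (a b : List Int) :
    pvScore a (PySem.List.sorted b (fun x => x)) = pvT a b := by
  set s := PySem.List.sorted b (fun x => x) with hsdef
  have hperm : s.Perm b := PySem.List.sorted_perm b (fun x => x) false
  have hsorted : s.Pairwise (· ≤ ·) := by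
    simpa using PySem.List.sorted_pairwise b (fun x => x)
  unfold pvScore pvT
  apply congrArg
  apply List.map_congr_left
  intro x _
  have hbl := pvBisectLeft_count s x hsorted
  have hbr := pvBisectRight_count s x hsorted
  have hlen := List.length_eq_countP_add_countP (fun y => decide (y ≤ x)) (l := s)
  have hgt : s.countP (fun y => decide ¬(decide (y ≤ x)) = true)
      = s.countP (fun y => decide (x < y)) := by
    apply List.countP_congr; intro y _; simp
  have hcl : s.countP (fun y => decide (y < x)) = b.countP (fun y => decide (y < x)) :=
    hperm.countP_eq _
  have hcg : s.countP (fun y => decide (x < y)) = b.countP (fun y => decide (x < y)) :=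
    hperm.countP_eq _
  rw [hbl, hbr]
  rw [hgt] at hlen
  omega

-- the two programs on an explicitly three-plus-element dice list
theorem pvMain (d0 d1 d2 : List Int) (rest : List (List Int)) :
    nontransitiveDice (d0 :: d1 :: d2 :: rest)
      = nontransitiveDice_alt (d0 :: d1 :: d2 :: rest) := by
  have hperms : PySem.List.permutations (PySem.List.pyRange 0 3 1) 3
      = [[0,1,2],[0,2,1],[1,0,2],[1,2,0],[2,0,1],[2,1,0]] := by decide
  have r0 : PySem.List.pyGetD (d0 :: d1 :: d2 :: rest) (0 : Int) [] = d0 := by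
    rw [PySem.List.pyGetD_of_nonneg _ _ (by norm_num)]; simp
  have r1 : PySem.List.pyGetD (d0 :: d1 :: d2 :: rest) (1 : Int) [] = d1 := by
    rw [PySem.List.pyGetD_of_nonneg _ _ (by norm_num)]; simp
  have r2 : PySem.List.pyGetD (d0 :: d1 :: d2 :: rest) (2 : Int) [] = d2 := by
    rw [PySem.List.pyGetD_of_nonneg _ _ (by norm_num)]; simp
  rw [nontransitiveDice, hperms, nontransitiveDice_alt]
  simp only [List.any_cons, List.any_nil, Bool.or_false,
    show PySem.List.pyGetD ([0,1,2] : List Int) 0 0 = 0 from by decide,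
    show PySem.List.pyGetD ([0,1,2] : List Int) 1 0 = 1 from by decide,
    show PySem.List.pyGetD ([0,1,2] : List Int) 2 0 = 2 from by decide,
    show PySem.List.pyGetD ([0,2,1] : List Int) 0 0 = 0 from by decide,
    show PySem.List.pyGetD ([0,2,1] : List Int) 1 0 = 2 from by decide,
    show PySem.List.pyGetD ([0,2,1] : List Int) 2 0 = 1 from by decide,
    show PySem.List.pyGetD ([1,0,2] : List Int) 0 0 = 1 from by decide,
    show PySem.List.pyGetD ([1,0,2] : List Int) 1 0 = 0 from by decide,
    show PySem.List.pyGetD ([1,0,2] : List Int) 2 0 = 2 from by decide,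
    show PySem.List.pyGetD ([1,2,0] : List Int) 0 0 = 1 from by decide,
    show PySem.List.pyGetD ([1,2,0] : List Int) 1 0 = 2 from by decide,
    show PySem.List.pyGetD ([1,2,0] : List Int) 2 0 = 0 from by decide,
    show PySem.List.pyGetD ([2,0,1] : List Int) 0 0 = 2 from by decide,
    show PySem.List.pyGetD ([2,0,1] : List Int) 1 0 = 0 from by decide,
    show PySem.List.pyGetD ([2,0,1] : List Int) 2 0 = 1 from by decide,
    show PySem.List.pyGetD ([2,1,0] : List Int) 0 0 = 2 from by decide,
    show PySem.List.pyGetD ([2,1,0] : List Int) 1 0 = 1 from by decide,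
    show PySem.List.pyGetD ([2,1,0] : List Int) 2 0 = 0 from by decide,
    r0, r1, r2, pvBeats_eq, pvScore_eq]
  rw [pvT_antisym d1 d0, pvT_antisym d2 d0, pvT_antisym d2 d1]
  simp only [neg_pos, Bool.or_assoc]

-- ===== VERDICT (by name: the statement is the Claim_ definition above) =====
theorem nontransitiveDice_spec : Claim_equal_nontransitiveDice := by
  intro dice _ hpre
  unfold Spec_nontransitiveDice
  match dice, hpre with
  | d0 :: d1 :: d2 :: rest, _ => exact pvMain d0 d1 d2 rest
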